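-- pv_equiv track=rewrite | github.com/clementgbcn/AdventOfCode2022 | Day01.py | count_increment
-- ===== SOURCE A (Python) =====
-- def count_increment(calories):
--     max_calorie = 0
--     current_calorie = 0
--     for calorie in calories:
--         if calorie:
--             current_calorie += int(calorie)
--         else:
--             max_calorie = max(max_calorie, current_calorie)
--             current_calorie = 0
--     max_calorie = max(max_calorie, current_calorie)
--     return max_calorie
-- ===== SOURCE B (Python) =====
-- def count_increment(calories):
--     # Partition into maximal runs of non-empty strings, sum each run,
--     # then take the maximum of all run sums together with a 0 baseline.
--     def group_sums(xs):
--         sums = []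
--         i, n = 0, len(xs)
--         while i < n:
--             if not xs[i]:
--                 i += 1
--                 continue
--             j = i
--             while j < n and xs[j]:
--                 j += 1
--             sums.append(sum(int(s) for s in xs[i:j]))
--             i = j
--         return sums
--     return max([0] + group_sums(calories))
-- ===== Notes on version B (the rewrite author's own statement) =====
-- stated objective: alternative
-- what changed: B replaces A's single branchy accumulator loop with a group-then-reduce structure: it partitions the list into maximal runs of non-empty strings, sums each run, and returns the maximum of the run sums together with a 0 baseline.
import Mathlib
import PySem

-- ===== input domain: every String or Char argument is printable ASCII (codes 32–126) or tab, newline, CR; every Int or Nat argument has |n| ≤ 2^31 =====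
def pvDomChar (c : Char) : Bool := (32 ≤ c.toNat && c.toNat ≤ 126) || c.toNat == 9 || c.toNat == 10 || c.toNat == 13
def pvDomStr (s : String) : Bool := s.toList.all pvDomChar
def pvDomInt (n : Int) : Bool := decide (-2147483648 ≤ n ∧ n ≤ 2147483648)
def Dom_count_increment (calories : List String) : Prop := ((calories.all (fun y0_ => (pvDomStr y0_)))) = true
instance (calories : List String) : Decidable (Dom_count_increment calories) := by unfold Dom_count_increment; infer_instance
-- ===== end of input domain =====

-- B re-implements A by partitioning the input into maximal runs of non-empty strings,
-- summing each run, and taking the max of the run sums with a 0 baseline (same cost, different decomposition).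


-- int(s); inside Pre_ the parse always succeeds, so getD 0 is never the defaulted case
def pvVal (s : String) : Int := (PySem.Int.ofStr? s).getD 0

-- ===== PORT A =====
def count_increment (calories : List String) : Int :=
  let st := calories.foldl
    (fun (p : Int × Int) c =>
      if c.toList ≠ [] then (p.1, p.2 + pvVal c)
      else (max p.1 p.2, 0))
    ((0 : Int), (0 : Int))
  max st.1 st.2

-- ===== PORT B =====
-- sums of the maximal runs of non-empty strings
def pvGroupSums : List String → List Int
  | [] => []
  | s :: rest =>
    if s.toList = [] then pvGroupSums rest
    else
      ((s :: rest).takeWhile (fun t => t.toList ≠ [])).foldl (fun a t => a + pvVal t) 0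
        :: pvGroupSums ((s :: rest).dropWhile (fun t => t.toList ≠ []))
termination_by xs => xs.length
decreasing_by
  all_goals simp only [List.dropWhile, List.length_cons]
  · omega
  · have hle := List.length_dropWhile_le (fun t : String => decide (t.toList ≠ [])) rest
    split <;> simp_all

def count_increment_alt (calories : List String) : Int :=
  (pvGroupSums calories).foldl max 0

-- ===== PRECONDITION & SPEC =====
-- exactly the inputs where A returns: every non-empty string parses as a Python int (else int() raises ValueError)
def Pre_count_increment (calories : List String) : Prop :=
  ∀ s ∈ calories, s.toList ≠ [] → (PySem.Int.ofStr? s).isSome = true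
instance (calories : List String) : Decidable (Pre_count_increment calories) := by
  unfold Pre_count_increment; infer_instance

def pvWitness_count_increment : List String := [" 7 ", "", "0", "1", "9"]

def Spec_count_increment (calories : List String) (out : Int) : Prop := out = count_increment_alt calories
instance (calories : List String) (out : Int) : Decidable (Spec_count_increment calories out) := by unfold Spec_count_increment; infer_instance

-- ===== CLAIM (what is proved, stated in full; the proofs are below) =====
def Claim_equal_count_increment : Prop := ∀ (calories : List String), Dom_count_increment calories → Pre_count_increment calories → Spec_count_increment calories (count_increment calories)

-- ===== LEMMAS AND PROOFS =====

-- A's loop body, named so rewriting does not disturb the lambda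
def pvStep (p : Int × Int) (c : String) : Int × Int :=
  if c.toList ≠ [] then (p.1, p.2 + pvVal c) else (max p.1 p.2, 0)

-- reference recursion: A's loop as structural recursion over the remaining list
def pvH (cur : Int) : List String → Int
  | [] => cur
  | s :: rest => if s.toList = [] then max cur (pvH 0 rest) else pvH (cur + pvVal s) rest

theorem pvA_fold (xs : List String) : ∀ (mx cur : Int),
    max (xs.foldl pvStep (mx, cur)).1 (xs.foldl pvStep (mx, cur)).2 = max mx (pvH cur xs) := by
  induction xs with
  | nil => intro mx cur; simp [pvH]
  | cons s rest ih =>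
    intro mx cur
    by_cases h : s.toList = []
    · rw [List.foldl_cons]
      have hs : pvStep (mx, cur) s = (max mx cur, 0) := by simp [pvStep, h]
      rw [hs, ih, pvH, if_pos h, max_assoc]
    · rw [List.foldl_cons]
      have hs : pvStep (mx, cur) s = (mx, cur + pvVal s) := by simp [pvStep, h]
      rw [hs, ih, pvH, if_neg h]

theorem pvH_run (grp : List String) : ∀ (rest : List String) (cur : Int),
    (∀ s ∈ grp, s.toList ≠ []) →
    pvH cur (grp ++ rest) = pvH (grp.foldl (fun a t => a + pvVal t) cur) rest := by
  induction grp with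
  | nil => intro rest cur _; rfl
  | cons s g ih =>
    intro rest cur hne
    have hs : s.toList ≠ [] := hne s (by simp)
    simp only [List.cons_append, pvH, if_neg hs, List.foldl]
    exact ih rest (cur + pvVal s) (fun t ht => hne t (by simp [ht]))

theorem pvB_eq_H (xs : List String) : ∀ a : Int, 0 ≤ a →
    (pvGroupSums xs).foldl max a = max a (pvH 0 xs) := by
  induction xs using pvGroupSums.induct with
  | case1 => intro a ha; simp [pvGroupSums, pvH, max_eq_left ha]
  | case2 s rest h ih =>
    intro a ha
    rw [pvGroupSums, if_pos h, ih a ha, pvH, if_pos h, ← max_assoc, max_eq_left ha]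
  | case3 s rest h ih =>
    intro a ha
    rw [pvGroupSums, if_neg h]
    have hmem : ∀ t ∈ (s :: rest).takeWhile (fun t => t.toList ≠ []), t.toList ≠ [] := by
      intro t ht; simpa using List.mem_takeWhile_imp ht
    have hrun : pvH 0 (s :: rest) =
        pvH (((s :: rest).takeWhile (fun t => t.toList ≠ [])).foldl (fun a t => a + pvVal t) 0)
          ((s :: rest).dropWhile (fun t => t.toList ≠ [])) := by
      conv_lhs => rw [← List.takeWhile_append_dropWhile
        (p := fun t : String => decide (t.toList ≠ [])) (l := s :: rest)]
      exact pvH_run _ _ 0 hmem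
    rw [hrun, List.foldl_cons]
    have hhead := List.head?_dropWhile_not (fun t : String => decide (t.toList ≠ [])) (s :: rest)
    rcases hd : (s :: rest).dropWhile (fun t => t.toList ≠ []) with _ | ⟨t, ts⟩
    · rw [hd] at ⊢
      simp only [pvGroupSums, List.foldl, pvH]
    · rw [hd] at ih hhead ⊢
      have ht : t.toList = [] := by simpa using hhead
      rw [ih _ (le_trans ha (le_max_left _ _))]
      simp only [pvH, if_pos ht]
      omega

-- ===== VERDICT (by name: the statement is the Claim_ definition above) =====
theorem count_increment_spec : Claim_equal_count_increment := by
  intro calories _ _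
  show count_increment calories = count_increment_alt calories
  have hA : count_increment calories
      = max (calories.foldl pvStep (0, 0)).1 (calories.foldl pvStep (0, 0)).2 := rfl
  rw [hA, pvA_fold calories 0 0, count_increment_alt, pvB_eq_H calories 0 le_rfl]
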